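-- pv_equiv track=rewrite | github.com/navillusS/cripto | criptopals/set1Criptopals/singleCharXorCipher.py | scorePlainText
-- ===== SOURCE A (Python) =====
-- def scorePlainText(text):
--     if text:
--         contAscii = 0
--         for i in range(65, 91):
--             if chr(i) in text.upper():
--                 contAscii += 1
--     else:
--         contAscii = 0
--     return contAscii
-- ===== SOURCE B (Python) =====
-- def scorePlainText(text):
--     if text:
--         letters = set()
--         for ch in text.upper():
--             if 'A' <= ch <= 'Z':
--                 letters.add(ch)
--         return len(letters)
--     return 0
-- ===== Notes on version B (the rewrite author's own statement) =====
-- stated objective: alternative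
-- what changed: B makes a single pass over the text collecting the set of uppercase letters it meets and returns its size, instead of A's loop over the 26 alphabet codes each doing a substring scan of text.upper(); it trades A's 26 C-level substring scans for one Python-level pass, so it is not measurably faster.
import Mathlib
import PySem

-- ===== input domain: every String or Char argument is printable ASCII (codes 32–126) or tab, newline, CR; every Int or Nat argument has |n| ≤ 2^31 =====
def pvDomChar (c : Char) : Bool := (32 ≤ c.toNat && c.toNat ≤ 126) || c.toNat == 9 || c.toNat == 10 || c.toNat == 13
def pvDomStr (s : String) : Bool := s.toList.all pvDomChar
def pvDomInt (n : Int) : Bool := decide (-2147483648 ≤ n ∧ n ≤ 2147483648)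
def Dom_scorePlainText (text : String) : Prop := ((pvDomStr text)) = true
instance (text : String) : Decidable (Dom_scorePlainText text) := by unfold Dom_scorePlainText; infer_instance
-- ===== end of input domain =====

-- ===== PORT A =====
-- B replaces A's 26-letter loop of substring scans of text.upper() by one pass over text.upper()
-- that collects the set of uppercase letters met and returns its size (alternative algorithm,
-- same return value on every String input; no speed claim).
-- chr(i) for 65 ≤ i < 91 is ported exactly as Char.ofNat i.toNat (always in range here).
def scorePlainText (text : String) : Int :=
  if text = "" then 0
  else
    (PySem.List.pyRange 65 91 1).foldl
      (fun acc i =>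
        if PySem.Str.isIn (String.ofList [Char.ofNat i.toNat]) (PySem.Str.upper text) then acc + 1
        else acc) 0

-- ===== PORT B =====
def scorePlainText_alt (text : String) : Int :=
  if text = "" then 0
  else
    let letters : PySem.Set Char :=
      (PySem.Str.upper text).toList.foldl
        (fun s ch => if 'A' ≤ ch && ch ≤ 'Z' then PySem.Set.add s ch else s) PySem.Set.empty
    PySem.Set.len letters

-- ===== PRECONDITION & SPEC =====
def Spec_scorePlainText (text : String) (out : Int) : Prop := out = scorePlainText_alt text
instance (text : String) (out : Int) : Decidable (Spec_scorePlainText text out) := by unfold Spec_scorePlainText; infer_instance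

-- ===== CLAIM =====
def Claim_equal_scorePlainText : Prop := ∀ (text : String), Dom_scorePlainText text → Spec_scorePlainText text (scorePlainText text)

-- ===== LEMMAS AND PROOFS =====

-- the 26 uppercase letters, in code order
def pvAlpha : List Char := "ABCDEFGHIJKLMNOPQRSTUVWXYZ".toList

theorem pvAlpha_nodup : pvAlpha.Nodup := by decide

theorem pvAlpha_mem_iff (c : Char) : c ∈ pvAlpha ↔ ('A' ≤ c && c ≤ 'Z') = true := by
  constructor
  · intro h
    have hall : pvAlpha.all (fun c => 'A' ≤ c && c ≤ 'Z') = true := by decide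
    exact (List.all_eq_true.mp hall) c h
  · intro h
    have h' := h
    simp only [Bool.and_eq_true, decide_eq_true_eq] at h'
    have h65 : 65 ≤ c.toNat := by
      have h1 := Char.le_def.mp h'.1
      rw [UInt32.le_iff_toNat_le] at h1
      exact h1
    have h90 : c.toNat ≤ 90 := by
      have h2 := Char.le_def.mp h'.2
      rw [UInt32.le_iff_toNat_le] at h2
      exact h2
    have hin : ∀ n : Nat, n < 91 → 65 ≤ n → Char.ofNat n ∈ pvAlpha := by decide
    have := hin c.toNat (by omega) h65
    simpa [Char.ofNat_toNat] using this

-- the per-letter test of A: single-char substring containment is character membership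
theorem pred_eq (text : String) (i : Int) :
    PySem.Str.isIn (String.ofList [Char.ofNat i.toNat]) (PySem.Str.upper text)
      = decide (Char.ofNat i.toNat ∈ (PySem.Str.upper text).toList) := by
  rw [Bool.eq_iff_iff, PySem.Str.isIn_iff_infix]
  simp [String.toList_ofList, List.singleton_infix_iff]

-- the conditional fold of B is a fold of Set.add over the filtered list
theorem condFold (p : Char → Bool) (l : List Char) (s : PySem.Set Char) :
    l.foldl (fun s ch => if p ch then PySem.Set.add s ch else s) s
      = (l.filter p).foldl PySem.Set.add s := by
  induction l generalizing s with
  | nil => rfl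
  | cons a l ih =>
    cases h : p a <;> simp [h, ih]

-- A's count over the alphabet codes, as a filter over the 26 letter characters
theorem countA_eq (L : List Char) :
    (PySem.List.pyRange 65 91 1).countP
        (fun i => decide (Char.ofNat i.toNat ∈ L))
      = (pvAlpha.filter (fun c => decide (c ∈ L))).length := by
  have hrange : PySem.List.pyRange 65 91 1 = pvAlpha.map (fun c => (c.toNat : Int)) := by decide
  rw [hrange, List.countP_eq_length_filter, List.filter_map, List.length_map]
  simp [Function.comp_def, Char.ofNat_toNat]

-- the two nodup lists have the same members, hence the same length
theorem lengths_eq (L : List Char) :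
    ((pvAlpha.filter (fun c => decide (c ∈ L))).length : Int)
      = ((PySem.Set.ofList (L.filter (fun ch => 'A' ≤ ch && ch ≤ 'Z'))).length : Int) := by
  have h1 : (pvAlpha.filter (fun c => decide (c ∈ L))).Nodup := pvAlpha_nodup.filter _
  have h2 : (PySem.Set.ofList (L.filter (fun ch => 'A' ≤ ch && ch ≤ 'Z'))).Nodup :=
    PySem.Set.nodup_ofList _
  have hperm : List.Perm (pvAlpha.filter (fun c => decide (c ∈ L)))
      (PySem.Set.ofList (L.filter (fun ch => 'A' ≤ ch && ch ≤ 'Z'))) := by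
    rw [List.perm_ext_iff_of_nodup h1 h2]
    intro c
    simp only [List.mem_filter, PySem.Set.mem_ofList, decide_eq_true_eq]
    rw [pvAlpha_mem_iff]
    tauto
  exact_mod_cast hperm.length_eq

-- ===== VERDICT =====
theorem scorePlainText_spec : Claim_equal_scorePlainText := by
  intro text _
  unfold Spec_scorePlainText scorePlainText scorePlainText_alt
  by_cases h : text = ""
  · simp [h]
  · simp only [h, if_false]
    rw [PySem.List.foldl_if_add_one]
    rw [condFold, show (PySem.Set.empty : PySem.Set Char) = [] from rfl, ← PySem.Set.ofList_eq_foldl]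
    have : (fun i : Int => PySem.Str.isIn (String.ofList [Char.ofNat i.toNat]) (PySem.Str.upper text))
        = (fun i : Int => decide (Char.ofNat i.toNat ∈ (PySem.Str.upper text).toList)) :=
      funext fun i => pred_eq text i
    rw [this, Int.zero_add, countA_eq, PySem.Set.len]
    exact lengths_eq (PySem.Str.upper text).toList
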